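-- pv_equiv track=rewrite | github.com/alexpill/advent-of-code | 2022/10/cathode-ray_tube.py | sum_of_signal_strengths
-- ===== SOURCE A (Python) =====
-- def sum_of_signal_strengths(values):
--     cycle = 0
--     x_register = 1
--     signals = []
--     for val, *args in values:
--         if val == 'noop':
--             cycle += 1
--             if (cycle + 20) % 40 == 0: signals.append(cycle * x_register)
--         elif val == 'addx':
--             for _ in range(2):
--                 cycle += 1
--                 if (cycle + 20) % 40 == 0: signals.append(cycle * x_register)
--             x_register += int(args[0])
--     return sum(signals)
-- ===== SOURCE B (Python) =====
-- def sum_of_signal_strengths(values):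
--     x = 1
--     table = []
--     for val, *args in values:
--         if val == 'noop':
--             table.append(x)
--         elif val == 'addx':
--             table.append(x)
--             table.append(x)
--             x += int(args[0])
--     return sum(c * table[c - 1] for c in range(20, len(table) + 1, 40))
-- ===== Notes on version B (the rewrite author's own statement) =====
-- stated objective: alternative
-- what changed: B separates simulation from sampling: it first builds a flat per-cycle X table (appending the pre-add register once for noop, twice for addx), then sums c * table[c-1] over range(20, len+1, 40), instead of A's interleaved (cycle+20) % 40 == 0 test and signals accumulator at every cycle.
import Mathlib
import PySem

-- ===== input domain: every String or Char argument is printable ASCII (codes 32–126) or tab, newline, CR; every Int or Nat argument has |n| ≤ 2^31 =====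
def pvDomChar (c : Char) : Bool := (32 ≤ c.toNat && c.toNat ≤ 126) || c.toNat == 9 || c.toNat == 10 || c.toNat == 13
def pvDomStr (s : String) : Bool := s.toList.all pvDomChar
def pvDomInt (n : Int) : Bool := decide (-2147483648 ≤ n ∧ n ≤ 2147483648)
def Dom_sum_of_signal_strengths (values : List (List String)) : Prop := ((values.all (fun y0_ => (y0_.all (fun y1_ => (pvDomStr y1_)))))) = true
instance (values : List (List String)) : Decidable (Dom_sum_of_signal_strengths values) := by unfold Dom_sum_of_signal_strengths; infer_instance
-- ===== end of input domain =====

-- B separates simulation from sampling: it first builds the per-cycle X table, then sums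
-- c * table[c-1] over the sampled cycles range(20, len+1, 40); objective: alternative decomposition.

-- ===== PORT A =====
-- Literal transliteration of A: one fold carrying (cycle, x_register, signals),
-- testing (cycle+20) % 40 == 0 at every cycle; 'addx' runs the inner 'for _ in range(2)'.
def sum_of_signal_strengths (values : List (List String)) : Int :=
  let fin := values.foldl (fun (st : Int × Int × List Int) row =>
      let cycle := st.1
      let x_register := st.2.1
      let signals := st.2.2
      let val := row.headD ""          -- val, *args = row  (empty row raises: outside Pre_)
      let args := row.tail
      if val = "noop" then
        let cycle := cycle + 1
        let signals := if PySem.Int.mod (cycle + 20) 40 = 0 then signals ++ [cycle * x_register] else signals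
        (cycle, x_register, signals)
      else if val = "addx" then
        let p := (List.range 2).foldl (fun (p : Int × List Int) _ =>
            let cycle := p.1 + 1
            let signals := if PySem.Int.mod (cycle + 20) 40 = 0 then p.2 ++ [cycle * x_register] else p.2
            (cycle, signals)) (cycle, signals)
        -- int(args[0]): raises when args is empty or not int-parseable — outside Pre_
        (p.1, x_register + ((PySem.List.pyGet? args 0).bind PySem.Int.ofStr?).getD 0, p.2)
      else (cycle, x_register, signals)
    ) (0, 1, ([] : List Int))
  fin.2.2.sum

-- ===== PORT B =====
-- B's second phase: sum(c * table[c-1] for c in range(20, len(table)+1, 40))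
def pvSample (table : List Int) : Int :=
  (PySem.List.pyRange 20 ((table.length : Int) + 1) 40).foldl
    (fun acc c => acc + c * PySem.List.pyGetD table (c - 1) 0) 0

def sum_of_signal_strengths_alt (values : List (List String)) : Int :=
  let fin := values.foldl (fun (st : Int × List Int) row =>
      let x := st.1
      let table := st.2
      let val := row.headD ""
      let args := row.tail
      if val = "noop" then (x, table ++ [x])
      else if val = "addx" then
        (x + ((PySem.List.pyGet? args 0).bind PySem.Int.ofStr?).getD 0, table ++ [x, x])
      else st
    ) (1, ([] : List Int))
  pvSample fin.2

-- ===== PRECONDITION & SPEC =====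
-- Pre_ excludes exactly the inputs on which Python A raises: an empty row (unpacking
-- 'val, *args = row' raises ValueError) and an 'addx' row whose second field is missing
-- (IndexError) or not int()-parseable (ValueError).
def Pre_sum_of_signal_strengths (values : List (List String)) : Prop :=
  ∀ row ∈ values, row ≠ [] ∧
    (row.headD "" = "addx" → ((PySem.List.pyGet? row.tail 0).bind PySem.Int.ofStr?).isSome = true)
instance (values : List (List String)) : Decidable (Pre_sum_of_signal_strengths values) := by
  unfold Pre_sum_of_signal_strengths; infer_instance

def pvWitness_sum_of_signal_strengths : List (List String) := [["noop"], ["addx", "3"]]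

def Spec_sum_of_signal_strengths (values : List (List String)) (out : Int) : Prop := out = sum_of_signal_strengths_alt values
instance (values : List (List String)) (out : Int) : Decidable (Spec_sum_of_signal_strengths values out) := by unfold Spec_sum_of_signal_strengths; infer_instance

-- ===== CLAIM (what is proved, stated in full; the proofs are below) =====
def Claim_equal_sum_of_signal_strengths : Prop := ∀ (values : List (List String)), Dom_sum_of_signal_strengths values → Pre_sum_of_signal_strengths values → Spec_sum_of_signal_strengths values (sum_of_signal_strengths values)

-- ===== LEMMAS AND PROOFS =====

lemma pvGetD_append_left (t : List Int) (x k : Int) (h0 : 0 ≤ k) (h : k < (t.length : Int)) :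
    PySem.List.pyGetD (t ++ [x]) k 0 = PySem.List.pyGetD t k 0 := by
  rw [PySem.List.pyGetD_eq_getElem _ _ h0 (by simp; omega),
      PySem.List.pyGetD_eq_getElem _ _ h0 h]
  exact List.getElem_append_left (by omega)

-- Appending one cycle's X value to the table adds exactly the signal A records at that cycle.
lemma pvSample_append (t : List Int) (x : Int) :
    pvSample (t ++ [x]) =
      pvSample t +
        (if PySem.Int.mod ((t.length : Int) + 1 + 20) 40 = 0 then ((t.length : Int) + 1) * x else 0) := by
  unfold pvSample
  rw [PySem.List.foldl_add _ (fun c => c * PySem.List.pyGetD (t ++ [x]) (c - 1) 0) 0,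
      PySem.List.foldl_add _ (fun c => c * PySem.List.pyGetD t (c - 1) 0) 0]
  rw [show ((t ++ [x]).length : Int) + 1 = (t.length : Int) + 2 by simp; omega]
  rw [PySem.List.pyRange_of_pos 20 ((t.length : Int) + 2) (by norm_num),
      PySem.List.pyRange_of_pos 20 ((t.length : Int) + 1) (by norm_num)]
  have h0 : (0 : Int) ≤ (t.length : Int) := by positivity
  have hcommon : ∀ (N : Nat), (N : Int) ≤ ((t.length : Int) + 1 - 20 + 40 - 1) / 40 →
      List.map (fun c => c * PySem.List.pyGetD (t ++ [x]) (c - 1) 0)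
          (List.map (fun k : Nat => (20 : Int) + 40 * (k : Int)) (List.range N))
        = List.map (fun c => c * PySem.List.pyGetD t (c - 1) 0)
          (List.map (fun k : Nat => (20 : Int) + 40 * (k : Int)) (List.range N)) := by
    intro N hN
    apply List.map_congr_left
    intro c hcm
    obtain ⟨k, hk, rfl⟩ := List.mem_map.mp hcm
    have hkN : k < N := List.mem_range.mp hk
    have hkb : 20 + 40 * (k : Int) ≤ (t.length : Int) := by omega
    show (20 + 40 * (k : Int)) * PySem.List.pyGetD (t ++ [x]) (20 + 40 * (k : Int) - 1) 0
      = (20 + 40 * (k : Int)) * PySem.List.pyGetD t (20 + 40 * (k : Int) - 1) 0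
    rw [pvGetD_append_left t x (20 + 40 * (k : Int) - 1) (by omega) (by omega)]
  by_cases hdvd : (40 : Int) ∣ ((t.length : Int) + 21)
  · rw [if_pos (show PySem.Int.mod ((t.length : Int) + 1 + 20) 40 = 0 by
      rw [show (t.length : Int) + 1 + 20 = (t.length : Int) + 21 by ring,
          PySem.Int.mod_eq_zero_iff_dvd]; exact hdvd)]
    have hN2 : (if (20 : Int) < (t.length : Int) + 2 then (((t.length : Int) + 2 - 20 + 40 - 1) / 40).toNat else 0)
          = (if (20 : Int) < (t.length : Int) + 1 then (((t.length : Int) + 1 - 20 + 40 - 1) / 40).toNat else 0) + 1 := by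
      split_ifs <;> omega
    have hNle : (((if (20 : Int) < (t.length : Int) + 1 then (((t.length : Int) + 1 - 20 + 40 - 1) / 40).toNat else 0) : Nat) : Int)
          ≤ ((t.length : Int) + 1 - 20 + 40 - 1) / 40 := by
      split_ifs <;> omega
    have hNval : (20 : Int) + 40 * (((if (20 : Int) < (t.length : Int) + 1 then (((t.length : Int) + 1 - 20 + 40 - 1) / 40).toNat else 0) : Nat) : Int)
          = (t.length : Int) + 1 := by
      split_ifs <;> omega
    rw [hN2]
    rw [List.range_succ, List.map_append, List.map_append, List.sum_append]
    rw [hcommon _ hNle]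
    simp only [List.map_singleton, List.sum_cons, List.sum_nil]
    rw [hNval]
    have hget : PySem.List.pyGetD (t ++ [x]) ((t.length : Int) + 1 - 1) 0 = x := by
      rw [show (t.length : Int) + 1 - 1 = (t.length : Int) by ring]
      rw [PySem.List.pyGetD_eq_getElem _ _ h0 (by simp)]
      simp
    rw [hget]
    ring
  · rw [if_neg (show ¬ PySem.Int.mod ((t.length : Int) + 1 + 20) 40 = 0 by
      rw [show (t.length : Int) + 1 + 20 = (t.length : Int) + 21 by ring,
          PySem.Int.mod_eq_zero_iff_dvd]; exact hdvd)]
    rw [show (if (20 : Int) < (t.length : Int) + 2 then (((t.length : Int) + 2 - 20 + 40 - 1) / 40).toNat else 0)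
          = (if (20 : Int) < (t.length : Int) + 1 then (((t.length : Int) + 1 - 20 + 40 - 1) / 40).toNat else 0) by
      split_ifs <;> omega]
    by_cases h20 : (20 : Int) < (t.length : Int) + 1
    · have hNle : (((((t.length : Int) + 1 - 20 + 40 - 1) / 40).toNat : Int))
            ≤ ((t.length : Int) + 1 - 20 + 40 - 1) / 40 := by omega
      rw [if_pos h20, hcommon _ hNle]; ring
    · rw [if_neg h20]; simp

lemma pvSample_nil : pvSample [] = 0 := by decide

-- the two fold bodies, named so the induction can speak about them
def pvStepA (st : Int × Int × List Int) (row : List String) : Int × Int × List Int :=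
  let cycle := st.1
  let x_register := st.2.1
  let signals := st.2.2
  let val := row.headD ""
  let args := row.tail
  if val = "noop" then
    let cycle := cycle + 1
    let signals := if PySem.Int.mod (cycle + 20) 40 = 0 then signals ++ [cycle * x_register] else signals
    (cycle, x_register, signals)
  else if val = "addx" then
    let p := (List.range 2).foldl (fun (p : Int × List Int) _ =>
        let cycle := p.1 + 1
        let signals := if PySem.Int.mod (cycle + 20) 40 = 0 then p.2 ++ [cycle * x_register] else p.2
        (cycle, signals)) (cycle, signals)
    (p.1, x_register + ((PySem.List.pyGet? args 0).bind PySem.Int.ofStr?).getD 0, p.2)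
  else (cycle, x_register, signals)

def pvStepB (st : Int × List Int) (row : List String) : Int × List Int :=
  let x := st.1
  let table := st.2
  let val := row.headD ""
  let args := row.tail
  if val = "noop" then (x, table ++ [x])
  else if val = "addx" then
    (x + ((PySem.List.pyGet? args 0).bind PySem.Int.ofStr?).getD 0, table ++ [x, x])
  else st

lemma pvRun (values : List (List String)) :
    ∀ (x : Int) (table sigs : List Int), sigs.sum = pvSample table →
      (values.foldl pvStepA (((table.length : Int)), x, sigs)).2.2.sum
        = pvSample (values.foldl pvStepB (x, table)).2 := by
  induction values with
  | nil => intro x table sigs h; simpa using h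
  | cons row rest ih =>
    intro x table sigs h
    simp only [List.foldl_cons]
    by_cases hnoop : row.headD "" = "noop"
    · have hA : pvStepA ((table.length : Int), x, sigs) row
          = ((table.length : Int) + 1, x,
             if PySem.Int.mod ((table.length : Int) + 1 + 20) 40 = 0
               then sigs ++ [((table.length : Int) + 1) * x] else sigs) := by
        simp only [pvStepA]
        rw [if_pos hnoop]
      have hB : pvStepB (x, table) row = (x, table ++ [x]) := by
        simp only [pvStepB]
        rw [if_pos hnoop]
      rw [hA, hB]
      have hsum : (if PySem.Int.mod ((table.length : Int) + 1 + 20) 40 = 0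
            then sigs ++ [((table.length : Int) + 1) * x] else sigs).sum
          = pvSample (table ++ [x]) := by
        rw [pvSample_append, ← h]
        split_ifs <;> simp
      have hc := ih x (table ++ [x]) _ hsum
      rw [show ((table ++ [x]).length : Int) = (table.length : Int) + 1 by simp only [List.length_append, List.length_cons, List.length_nil]; omega] at hc
      exact hc
    · by_cases haddx : row.headD "" = "addx"
      · have hA : pvStepA ((table.length : Int), x, sigs) row
            = ((table.length : Int) + 1 + 1,
               x + ((PySem.List.pyGet? row.tail 0).bind PySem.Int.ofStr?).getD 0,
               (if PySem.Int.mod ((table.length : Int) + 1 + 1 + 20) 40 = 0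
                  then (if PySem.Int.mod ((table.length : Int) + 1 + 20) 40 = 0
                          then sigs ++ [((table.length : Int) + 1) * x] else sigs)
                       ++ [((table.length : Int) + 1 + 1) * x]
                  else (if PySem.Int.mod ((table.length : Int) + 1 + 20) 40 = 0
                          then sigs ++ [((table.length : Int) + 1) * x] else sigs))) := by
          simp only [pvStepA]
          rw [if_neg (by rw [haddx]; decide), if_pos haddx]
          rfl
        have hB : pvStepB (x, table) row
            = (x + ((PySem.List.pyGet? row.tail 0).bind PySem.Int.ofStr?).getD 0,
               table ++ [x, x]) := by
          simp only [pvStepB]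
          rw [if_neg (by rw [haddx]; decide), if_pos haddx]
        rw [hA, hB]
        have e1 : pvSample (table ++ [x])
            = pvSample table + (if PySem.Int.mod ((table.length : Int) + 1 + 20) 40 = 0
                then ((table.length : Int) + 1) * x else 0) := pvSample_append table x
        have e2 : pvSample (table ++ [x] ++ [x])
            = pvSample (table ++ [x]) + (if PySem.Int.mod ((table.length : Int) + 1 + 1 + 20) 40 = 0
                then ((table.length : Int) + 1 + 1) * x else 0) := by
          rw [pvSample_append (table ++ [x]) x,
              show ((table ++ [x]).length : Int) = (table.length : Int) + 1 by simp only [List.length_append, List.length_cons, List.length_nil]; omega]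
        have hsum : (if PySem.Int.mod ((table.length : Int) + 1 + 1 + 20) 40 = 0
              then (if PySem.Int.mod ((table.length : Int) + 1 + 20) 40 = 0
                      then sigs ++ [((table.length : Int) + 1) * x] else sigs)
                   ++ [((table.length : Int) + 1 + 1) * x]
              else (if PySem.Int.mod ((table.length : Int) + 1 + 20) 40 = 0
                      then sigs ++ [((table.length : Int) + 1) * x] else sigs)).sum
            = pvSample (table ++ [x] ++ [x]) := by
          rw [e2, e1, ← h]
          split_ifs <;> simp [List.sum_append, add_assoc]
        have hc := ih (x + ((PySem.List.pyGet? row.tail 0).bind PySem.Int.ofStr?).getD 0)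
          (table ++ [x] ++ [x]) _ hsum
        rw [show ((table ++ [x] ++ [x]).length : Int) = (table.length : Int) + 1 + 1 by simp only [List.length_append, List.length_cons, List.length_nil]; omega] at hc
        rw [show table ++ [x, x] = table ++ [x] ++ [x] by simp]
        exact hc
      · have hA : pvStepA ((table.length : Int), x, sigs) row = ((table.length : Int), x, sigs) := by
          simp only [pvStepA]
          rw [if_neg hnoop, if_neg haddx]
        have hB : pvStepB (x, table) row = (x, table) := by
          simp only [pvStepB]
          rw [if_neg hnoop, if_neg haddx]
        rw [hA, hB]; exact ih x table sigs h

-- ===== VERDICT (by name: the statement is the Claim_ definition above) =====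
theorem sum_of_signal_strengths_spec : Claim_equal_sum_of_signal_strengths := by
  intro values _dom _pre
  unfold Spec_sum_of_signal_strengths sum_of_signal_strengths sum_of_signal_strengths_alt
  have h := pvRun values 1 [] [] (by simp [pvSample_nil])
  simp only [List.length_nil, Nat.cast_zero] at h
  exact h
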